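-- pv_equiv track=rewrite | github.com/beiju/blaseball_analysis | rng_analysis/game_roll_mapping/resim4.py | calculate_advances
-- ===== SOURCE A (Python) =====
-- def force_advance(bases, start_at=0):
--     new_bases = {}
--     for i in range(start_at, 5):
--         if i in bases:
--             new_bases[i+1] = bases[i]
--     return new_bases
--
-- def calculate_advances(bases_before, bases_after, bases_hit):
--     # this code sucks so much. i hate runner advances. they're nasty
--     # (and i'm not even really using it)
--     bases = dict(bases_before)
--     for i in range(bases_hit):
--         bases = force_advance(bases, i)
--
--     if bases_hit > 0:
--         # ignore the batter
--         for i in range(bases_hit):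
--             if i in bases_after:
--                 del bases_after[i]
--         # and anyone past home. todo for fifth base lmao
--         for base in range(3, 6):
--             if base in bases:
--                 del bases[base]
--
--     third_scored = len(bases_after) < len(bases)
--
--     rolls = []
--     occupied = sorted(bases.keys(), reverse=True)
--     for runner in occupied:
--         player = bases[runner]
--
--         is_eligible = runner+1 not in bases
--         if is_eligible:
--             if runner == 2:
--                 did_advance = third_scored
--             else:
--                 did_advance = runner+1 in bases_after
--
--             rolls.append((player, runner, did_advance))
--             if did_advance:
--                 bases[runner+1] = bases[runner]
--                 del bases[runner]
--
--     return rolls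
-- ===== SOURCE B (Python) =====
-- def calculate_advances(bases_before, bases_after, bases_hit):
--     # Closed-form shift instead of iterated force_advance; scalar next-occupied
--     # tracking instead of mutating the bases dict during resolution.
--     # (A also deletes keys 0..bases_hit-1 from the caller's bases_after dict in
--     # place; B does not mutate its arguments — return values agree.)
--     if bases_hit > 0:
--         bases = {k + bases_hit: v for k, v in bases_before.items()
--                  if 0 <= k <= 2 - bases_hit}
--         after = {k: v for k, v in bases_after.items()
--                  if not (0 <= k < bases_hit)}
--     else:
--         bases = dict(bases_before)
--         after = dict(bases_after)
--
--     third_scored = len(after) < len(bases)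
--
--     rolls = []
--     next_occ = None  # lowest currently-occupied base above the runner at hand
--     for runner in sorted(bases, reverse=True):
--         if next_occ == runner + 1:
--             next_occ = runner  # blocked: not eligible to advance
--         else:
--             if runner == 2:
--                 did_advance = third_scored
--             else:
--                 did_advance = runner + 1 in after
--             rolls.append((bases[runner], runner, did_advance))
--             next_occ = runner + 1 if did_advance else runner
--     return rolls
-- ===== Notes on version B (the rewrite author's own statement) =====
-- stated objective: simpler
-- what changed: B replaces the bases_hit-iterated force_advance rebuild with one closed-form filtered shift of bases_before, and replaces the dict-mutating resolution loop (insert/delete per advance plus membership test) with a single scalar next-occupied-base tracker; B does not mutate bases_after.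
import Mathlib
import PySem

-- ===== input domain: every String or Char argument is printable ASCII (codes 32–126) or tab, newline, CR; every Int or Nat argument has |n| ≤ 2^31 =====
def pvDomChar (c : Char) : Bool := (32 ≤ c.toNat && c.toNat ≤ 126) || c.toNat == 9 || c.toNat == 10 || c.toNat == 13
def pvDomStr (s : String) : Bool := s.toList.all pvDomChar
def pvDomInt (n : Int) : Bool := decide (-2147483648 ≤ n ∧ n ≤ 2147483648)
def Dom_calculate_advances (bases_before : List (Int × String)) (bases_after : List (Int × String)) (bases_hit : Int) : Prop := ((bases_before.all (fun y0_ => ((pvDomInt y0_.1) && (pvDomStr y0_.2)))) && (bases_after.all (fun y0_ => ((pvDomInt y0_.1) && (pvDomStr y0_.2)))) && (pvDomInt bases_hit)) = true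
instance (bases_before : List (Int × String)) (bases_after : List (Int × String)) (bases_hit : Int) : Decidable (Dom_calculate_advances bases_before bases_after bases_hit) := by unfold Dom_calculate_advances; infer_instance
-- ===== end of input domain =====

-- B replaces the bases_hit-fold `force_advance` iteration by one closed-form filtered
-- shift and the dict-mutating resolution loop by a scalar next-occupied tracker
-- (objective: simpler).  A also deletes keys 0..bases_hit-1 from the caller's
-- bases_after dict in place; B does not mutate its arguments — the equivalence
-- proved here is about the return value.

-- ===== PORT A =====
-- body of force_advance's loop
def pvShiftStep (bases : PySem.Dict Int String) (new_bases : PySem.Dict Int String) (i : Int) : PySem.Dict Int String :=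
  if bases.contains i then new_bases.insert (i + 1) (bases.getD i "") else new_bases

def force_advance (bases : PySem.Dict Int String) (start_at : Int) : PySem.Dict Int String :=
  (PySem.List.pyRange start_at 5).foldl (pvShiftStep bases) PySem.Dict.empty

-- body of the two `if i in d: del d[i]` loops
def pvDelStep (d : PySem.Dict Int String) (i : Int) : PySem.Dict Int String :=
  if d.contains i then d.erase i else d

-- body of A's resolution loop over `occupied`
def pvStepA (after2 : PySem.Dict Int String) (third_scored : Bool)
    (st : List (String × Int × Bool) × PySem.Dict Int String) (runner : Int) :
    List (String × Int × Bool) × PySem.Dict Int String :=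
  let player := st.2.getD runner ""
  let is_eligible := !(st.2.contains (runner + 1))
  if is_eligible then
    let did_advance := if runner == 2 then third_scored else after2.contains (runner + 1)
    let rolls := st.1 ++ [(player, runner, did_advance)]
    if did_advance then (rolls, (st.2.insert (runner + 1) (st.2.getD runner "")).erase runner)
    else (rolls, st.2)
  else st

def calculate_advances (bases_before : List (Int × String)) (bases_after : List (Int × String)) (bases_hit : Int) : List (String × Int × Bool) :=
  let bases0 := PySem.Dict.ofList bases_before
  let bases1 := (PySem.List.pyRange 0 bases_hit).foldl (fun b i => force_advance b i) bases0
  -- `if bases_hit > 0:` — the two deletion loops (A mutates the caller's bases_after there)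
  let after2 :=
    if bases_hit > 0 then
      (PySem.List.pyRange 0 bases_hit).foldl pvDelStep (PySem.Dict.ofList bases_after)
    else PySem.Dict.ofList bases_after
  let bases2 :=
    if bases_hit > 0 then (PySem.List.pyRange 3 6).foldl pvDelStep bases1
    else bases1
  let third_scored := decide (after2.size < bases2.size)
  let occupied := PySem.List.sorted bases2.keys (fun k => k) true
  (occupied.foldl (pvStepA after2 third_scored) (([] : List (String × Int × Bool)), bases2)).1

-- ===== PORT B =====
-- body of the two dict comprehensions (insert the next comprehension item)
def pvInsStep (d : PySem.Dict Int String) (q : Int × String) : PySem.Dict Int String :=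
  d.insert q.1 q.2

-- body of B's resolution loop: state is (rolls, next_occ)
def pvStepB (bases after : PySem.Dict Int String) (third_scored : Bool)
    (st : List (String × Int × Bool) × Option Int) (runner : Int) :
    List (String × Int × Bool) × Option Int :=
  if st.2 == some (runner + 1) then (st.1, some runner)
  else
    let did_advance := if runner == 2 then third_scored else after.contains (runner + 1)
    (st.1 ++ [(bases.getD runner "", runner, did_advance)],
      some (if did_advance then runner + 1 else runner))

def calculate_advances_alt (bases_before : List (Int × String)) (bases_after : List (Int × String)) (bases_hit : Int) : List (String × Int × Bool) :=
  let before := PySem.Dict.ofList bases_before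
  let afterIn := PySem.Dict.ofList bases_after
  let bases :=
    if bases_hit > 0 then
      ((before.items.filter (fun p => decide (0 ≤ p.1) && decide (p.1 ≤ 2 - bases_hit))).map
          (fun p => (p.1 + bases_hit, p.2))).foldl pvInsStep PySem.Dict.empty
    else before
  let after :=
    if bases_hit > 0 then
      (afterIn.items.filter (fun p => !(decide (0 ≤ p.1) && decide (p.1 < bases_hit)))).foldl
        pvInsStep PySem.Dict.empty
    else afterIn
  let third_scored := decide (after.size < bases.size)
  ((PySem.List.sorted bases.keys (fun k => k) true).foldl (pvStepB bases after third_scored)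
    (([] : List (String × Int × Bool)), (none : Option Int))).1

-- ===== PRECONDITION & SPEC =====
def Spec_calculate_advances (bases_before : List (Int × String)) (bases_after : List (Int × String)) (bases_hit : Int) (out : List (String × Int × Bool)) : Prop := out = calculate_advances_alt bases_before bases_after bases_hit
instance (bases_before : List (Int × String)) (bases_after : List (Int × String)) (bases_hit : Int) (out : List (String × Int × Bool)) : Decidable (Spec_calculate_advances bases_before bases_after bases_hit out) := by unfold Spec_calculate_advances; infer_instance

-- ===== CLAIM (what is proved, stated in full; the proofs are below) =====
def Claim_equal_calculate_advances : Prop := ∀ (bases_before : List (Int × String)) (bases_after : List (Int × String)) (bases_hit : Int), Dom_calculate_advances bases_before bases_after bases_hit → Spec_calculate_advances bases_before bases_after bases_hit (calculate_advances bases_before bases_after bases_hit)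

-- ===== LEMMAS AND PROOFS =====

-- Small dictionary facts the proofs need (erase is items-filter by definition).
theorem pv_find?_filter_ne (L : List (Int × String)) (k x : Int) :
    ((L.filter (fun p => !(p.1 == k))).find? (fun p => p.1 == x))
      = if x = k then none else L.find? (fun p => p.1 == x) := by
  induction L with
  | nil => simp
  | cons p t ih =>
    by_cases hpk : p.1 = k
    · by_cases hxk : x = k
      · simp [hpk, ih, hxk]
      · simp only [List.filter_cons, hpk]
        simp only [BEq.rfl, Bool.not_true, Bool.false_eq_true, if_false, ih, hxk, if_false]
        rw [List.find?_cons_of_neg]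
        simp; omega
    · by_cases hpx : p.1 = x
      · by_cases hxk : x = k
        · omega
        · simp [List.filter_cons, hpk, hpx, List.find?_cons, hxk]
      · simp [List.filter_cons, hpk, hpx, List.find?_cons, ih]

theorem pv_get?_erase (d : PySem.Dict Int String) (k x : Int) :
    (d.erase k).get? x = if x = k then none else d.get? x := by
  show ((d.items.filter (fun p => !(p.1 == k))).find? (fun p => p.1 == x)).map (·.2)
      = if x = k then none else d.get? x
  rw [pv_find?_filter_ne]
  by_cases hxk : x = k <;> simp [hxk] <;> rfl

theorem pv_contains_erase (d : PySem.Dict Int String) (k x : Int) :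
    (d.erase k).contains x = if x = k then false else d.contains x := by
  rw [PySem.Dict.contains_eq_isSome_get?, pv_get?_erase]
  by_cases hxk : x = k <;> simp [hxk, PySem.Dict.contains_eq_isSome_get?]

-- Reference form of the resolution loop: runners in strictly decreasing order,
-- `no` = lowest currently occupied base strictly above the runner at hand.
def pvResolve (bB after : PySem.Dict Int String) (third : Bool) :
    List Int → Option Int → List (String × Int × Bool)
  | [], _ => []
  | r :: rest, no =>
    if no = some (r + 1) then pvResolve bB after third rest (some r)
    else
      let adv := if r = 2 then third else after.contains (r + 1)
      (bB.getD r "", r, adv) :: pvResolve bB after third rest (some (if adv then r + 1 else r))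

-- B's loop computes pvResolve.
theorem pvLoopB_eq (bB after : PySem.Dict Int String) (third : Bool) :
    ∀ (ks : List Int) (acc : List (String × Int × Bool)) (no : Option Int),
    (ks.foldl (pvStepB bB after third) (acc, no)).1 = acc ++ pvResolve bB after third ks no := by
  intro ks
  induction ks with
  | nil => intro acc no; simp [pvResolve]
  | cons r rest ih =>
    intro acc no
    rw [List.foldl_cons]
    by_cases h : no = some (r + 1)
    · have hstep : pvStepB bB after third (acc, no) r = (acc, some r) := by
        simp [pvStepB, h]
      rw [hstep, ih]
      simp only [pvResolve]
      rw [if_pos h]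
    · set adv := if r = 2 then third else after.contains (r + 1) with hadv
      have hstep : pvStepB bB after third (acc, no) r
          = (acc ++ [(bB.getD r "", r, adv)], some (if adv then r + 1 else r)) := by
        have hb : (no == some (r + 1)) = false := by simp [h]
        simp only [pvStepB, hb, Bool.false_eq_true, if_false, hadv]
        by_cases h2 : r = 2 <;> simp [h2]
      rw [hstep, ih]
      simp only [pvResolve]
      rw [if_neg h]
      by_cases h2 : r = 2 <;> simp [h2, hadv]

-- A's loop computes pvResolve too, under the stated invariants
-- (b agrees with bB on the unprocessed runners; every base occupied in b above
-- all unprocessed runners lies at or above `no`, which is itself occupied).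
theorem pvLoopA_eq (bB after : PySem.Dict Int String) (third : Bool) :
    ∀ (ks : List Int) (acc : List (String × Int × Bool)) (no : Option Int)
      (b : PySem.Dict Int String),
    ks.Pairwise (fun a c => c < a) →
    (∀ k ∈ ks, b.get? k = bB.get? k) →
    (∀ k ∈ ks, (bB.get? k).isSome) →
    (∀ x : Int, b.contains x = true → x ∈ ks ∨ ∀ k ∈ ks, k < x) →
    (∀ m : Int, no = some m → b.contains m = true ∧ ∀ k ∈ ks, k < m) →
    (∀ x : Int, (∀ k ∈ ks, k < x) → b.contains x = true → ∃ m, no = some m ∧ m ≤ x) →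
    (ks.foldl (pvStepA after third) (acc, b)).1 = acc ++ pvResolve bB after third ks no := by
  intro ks
  induction ks with
  | nil => intro acc no b _ _ _ _ _ _; simp [pvResolve]
  | cons r rest ih =>
    intro acc no b hch Ha Hk Hc Hd1 Hd2
    have hrmem : r ∈ r :: rest := by simp
    have hrlt : ∀ k ∈ rest, k < r := (List.pairwise_cons.mp hch).1
    have hchrest := (List.pairwise_cons.mp hch).2
    have hbr : b.contains r = true := by
      rw [PySem.Dict.contains_eq_isSome_get?, Ha r hrmem]
      exact Hk r hrmem
    have hiff : b.contains (r + 1) = true ↔ no = some (r + 1) := by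
      constructor
      · intro hc
        rcases Hc (r + 1) hc with hmem | hall
        · rcases List.mem_cons.mp hmem with h | h
          · omega
          · exact absurd (hrlt _ h) (by omega)
        · rcases Hd2 (r + 1) hall hc with ⟨m, hm, hmle⟩
          have := (Hd1 m hm).2 r hrmem
          have hm1 : m = r + 1 := by omega
          rw [hm, hm1]
      · intro hno; exact (Hd1 (r + 1) hno).1
    rw [List.foldl_cons]
    by_cases hno : no = some (r + 1)
    · -- blocked: runner not eligible
      have hcont : b.contains (r + 1) = true := hiff.mpr hno
      have hstep : pvStepA after third (acc, b) r = (acc, b) := by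
        simp [pvStepA, hcont]
      rw [hstep]
      rw [ih acc (some r) b hchrest
        (fun k hk => Ha k (List.mem_cons_of_mem _ hk))
        (fun k hk => Hk k (List.mem_cons_of_mem _ hk))
        (fun x hx => by
          rcases Hc x hx with hmem | hall
          · rcases List.mem_cons.mp hmem with h | h
            · right; intro k hk; rw [h]; exact hrlt k hk
            · left; exact h
          · right; intro k hk; exact hall k (List.mem_cons_of_mem _ hk))
        (fun m hm => by
          injection hm with hm'; subst hm'
          exact ⟨hbr, hrlt⟩)
        (fun x hall hx => by
          rcases Hc x hx with hmem | hall2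
          · rcases List.mem_cons.mp hmem with h | h
            · exact ⟨r, rfl, by omega⟩
            · exact absurd (hall x h) (by omega)
          · exact ⟨r, rfl, by have := hall2 r hrmem; omega⟩)]
      simp only [pvResolve]
      rw [if_pos hno]
    · -- eligible
      have hcont : b.contains (r + 1) = false := by
        rcases h : b.contains (r + 1) with _ | _
        · rfl
        · exact absurd (hiff.mp h) hno
      set advA := if r = 2 then third else after.contains (r + 1) with hadv
      have hplayer : b.getD r "" = bB.getD r "" := by
        rw [PySem.Dict.getD_eq_get?_getD, PySem.Dict.getD_eq_get?_getD, Ha r hrmem]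
      have hstep : pvStepA after third (acc, b) r
          = (acc ++ [(bB.getD r "", r, advA)],
             if advA then (b.insert (r + 1) (b.getD r "")).erase r else b) := by
        simp only [pvStepA, hcont, Bool.not_false, if_true]
        rw [← hplayer]
        by_cases h2 : r = 2
        · simp only [hadv, h2, BEq.rfl, if_true, if_pos rfl]
          cases third <;> simp
        · have hb2 : (r == 2) = false := by simp [h2]
          simp only [hb2, Bool.false_eq_true, if_false, hadv, if_neg h2]
          cases h3 : after.contains (r + 1) <;> simp
      rw [hstep]
      cases hA : advA with
      | false =>
        simp only [Bool.false_eq_true, if_false]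
        rw [ih (acc ++ [(bB.getD r "", r, false)]) (some r) b hchrest
          (fun k hk => Ha k (List.mem_cons_of_mem _ hk))
          (fun k hk => Hk k (List.mem_cons_of_mem _ hk))
          (fun x hx => by
            rcases Hc x hx with hmem | hall
            · rcases List.mem_cons.mp hmem with h | h
              · right; intro k hk; rw [h]; exact hrlt k hk
              · left; exact h
            · right; intro k hk; exact hall k (List.mem_cons_of_mem _ hk))
          (fun m hm => by injection hm with hm'; subst hm'; exact ⟨hbr, hrlt⟩)
          (fun x hall hx => by
            rcases Hc x hx with hmem | hall2
            · rcases List.mem_cons.mp hmem with h | h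
              · exact ⟨r, rfl, by omega⟩
              · exact absurd (hall x h) (by omega)
            · exact ⟨r, rfl, by have := hall2 r hrmem; omega⟩)]
        simp only [pvResolve]
        rw [if_neg hno, ← hadv, hA]
        simp
      | true =>
        simp only [if_true]
        rw [ih (acc ++ [(bB.getD r "", r, true)]) (some (r + 1))
          ((b.insert (r + 1) (b.getD r "")).erase r) hchrest
          (fun k hk => by
            have hkr : k < r := hrlt k hk
            rw [pv_get?_erase, if_neg (by omega : ¬ k = r),
              PySem.Dict.get?_insert, if_neg (by omega : ¬ k = r + 1)]
            exact Ha k (List.mem_cons_of_mem _ hk))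
          (fun k hk => Hk k (List.mem_cons_of_mem _ hk))
          (fun x hx => by
            rw [pv_contains_erase] at hx
            by_cases hxr : x = r
            · rw [if_pos hxr] at hx; exact absurd hx (by simp)
            · rw [if_neg hxr] at hx
              rw [PySem.Dict.contains_insert] at hx
              rcases Bool.or_eq_true_iff.mp hx with h1 | h1
              · have hx1 : x = r + 1 := by simpa using h1
                right; intro k hk; have := hrlt k hk; omega
              · rcases Hc x h1 with hmem | hall
                · rcases List.mem_cons.mp hmem with h | h
                  · exact absurd h hxr
                  · left; exact h
                · right; intro k hk; exact hall k (List.mem_cons_of_mem _ hk))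
          (fun m hm => by
            injection hm with hm'; subst hm'
            constructor
            · rw [pv_contains_erase, if_neg (by omega : ¬ r + 1 = r), PySem.Dict.contains_insert]
              simp
            · intro k hk; have := hrlt k hk; omega)
          (fun x hall hx => by
            rw [pv_contains_erase] at hx
            by_cases hxr : x = r
            · rw [if_pos hxr] at hx; exact absurd hx (by simp)
            · rw [if_neg hxr] at hx
              rw [PySem.Dict.contains_insert] at hx
              rcases Bool.or_eq_true_iff.mp hx with h1 | h1
              · have hx1 : x = r + 1 := by simpa using h1
                exact ⟨r + 1, rfl, by omega⟩
              · rcases Hc x h1 with hmem | hall2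
                · rcases List.mem_cons.mp hmem with h | h
                  · exact absurd h hxr
                  · exact absurd (hall x h) (by omega)
                · have := hall2 r hrmem
                  exact ⟨r + 1, rfl, by omega⟩)]
        simp only [pvResolve]
        rw [if_neg hno, ← hadv, hA]
        simp
    
theorem pv_pairwise_gt_of_ge_nodup (l : List Int)
    (h1 : l.Pairwise (fun a b => b ≤ a)) (h2 : l.Nodup) :
    l.Pairwise (fun a b => b < a) := by
  have h3 := h1.and h2
  exact h3.imp (by rintro a b ⟨hle, hne⟩; omega)

-- The tail stage of both programs agrees once the two bases dicts agree as
-- lookup tables (and the after dict is the same).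
theorem pvFinal_eq (bA bB after : PySem.Dict Int String)
    (hext : ∀ x, bA.get? x = bB.get? x)
    (hndA : bA.keys.Nodup) (hndB : bB.keys.Nodup) :
    ((PySem.List.sorted bA.keys (fun k => k) true).foldl
      (pvStepA after (decide (after.size < bA.size)))
      (([] : List (String × Int × Bool)), bA)).1
    = ((PySem.List.sorted bB.keys (fun k => k) true).foldl
      (pvStepB bB after (decide (after.size < bB.size)))
      (([] : List (String × Int × Bool)), (none : Option Int))).1 := by
  have hmem : ∀ x, x ∈ bA.keys ↔ x ∈ bB.keys := by
    intro x
    rw [← PySem.Dict.contains_iff_mem_keys, ← PySem.Dict.contains_iff_mem_keys,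
      PySem.Dict.contains_eq_isSome_get?, PySem.Dict.contains_eq_isSome_get?, hext]
  have hperm : bA.keys.Perm bB.keys := (List.perm_ext_iff_of_nodup hndA hndB).mpr hmem
  have hsize : bA.size = bB.size := by
    have h1 : bA.keys.length = bB.keys.length := hperm.length_eq
    simpa [PySem.Dict.keys, PySem.Dict.size] using h1
  have hsorted : PySem.List.sorted bA.keys (fun k => k) true
      = PySem.List.sorted bB.keys (fun k => k) true := by
    apply PySem.List.sorted_rev_eq_of_perm_of_pairwise_gt
    · exact (PySem.List.sorted_perm bB.keys (fun k => k) true).trans hperm.symm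
    · apply pv_pairwise_gt_of_ge_nodup
      · exact PySem.List.sorted_pairwise_rev bB.keys (fun k => k)
      · exact ((PySem.List.sorted_perm bB.keys (fun k => k) true).nodup_iff).mpr hndB
  have hchain : (PySem.List.sorted bA.keys (fun k => k) true).Pairwise (fun a c => c < a) := by
    rw [hsorted]
    apply pv_pairwise_gt_of_ge_nodup
    · exact PySem.List.sorted_pairwise_rev bB.keys (fun k => k)
    · exact ((PySem.List.sorted_perm bB.keys (fun k => k) true).nodup_iff).mpr hndB
  rw [hsize, hsorted]
  rw [pvLoopA_eq bB after (decide (after.size < bB.size))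
    (PySem.List.sorted bB.keys (fun k => k) true) [] none bA
    (by rw [← hsorted]; exact hchain)
    (fun k _ => hext k)
    (fun k hk => by
      rw [← hext k, ← PySem.Dict.contains_eq_isSome_get?, PySem.Dict.contains_iff_mem_keys]
      exact (hmem k).mpr ((PySem.List.mem_sorted bB.keys (fun k => k) true k).mp hk))
    (fun x hx => by
      left
      rw [PySem.List.mem_sorted]
      exact (hmem x).mp ((PySem.Dict.contains_iff_mem_keys bA x).mp hx))
    (fun m hm => by simp at hm)
    (fun x hall hx => by
      exfalso
      have hxmem : x ∈ PySem.List.sorted bB.keys (fun k => k) true := by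
        rw [PySem.List.mem_sorted]
        exact (hmem x).mp ((PySem.Dict.contains_iff_mem_keys bA x).mp hx)
      exact absurd (hall x hxmem) (by omega))]
  rw [pvLoopB_eq]

-- contains+getD = get?
theorem pv_c_getD_iff (d : PySem.Dict Int String) (k : Int) (v : String) :
    (d.contains k = true ∧ d.getD k "" = v) ↔ d.get? k = some v := by
  rw [PySem.Dict.contains_eq_isSome_get?, PySem.Dict.getD_eq_get?_getD]
  cases h : d.get? k <;> simp

-- get? extensionality from items-membership extensionality
theorem pv_get?_ext (dA dB : PySem.Dict Int String)
    (hndA : dA.keys.Nodup) (hndB : dB.keys.Nodup)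
    (h : ∀ k v, (k, v) ∈ dA.items ↔ (k, v) ∈ dB.items) :
    ∀ k, dA.get? k = dB.get? k := by
  intro k
  cases hA : dA.get? k with
  | some v =>
    exact ((PySem.Dict.get?_eq_some_iff_mem_items dB k v hndB).mpr
      ((h k v).mp ((PySem.Dict.get?_eq_some_iff_mem_items dA k v hndA).mp hA))).symm
  | none =>
    cases hB : dB.get? k with
    | none => rfl
    | some w =>
      have := (h k w).mpr ((PySem.Dict.get?_eq_some_iff_mem_items dB k w hndB).mp hB)
      rw [(PySem.Dict.get?_eq_some_iff_mem_items dA k w hndA).mpr this] at hA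
      exact absurd hA (by simp)

-- force_advance: items characterisation
theorem pvFA_fold_items (d : PySem.Dict Int String) :
    ∀ (L : List Int) (nb : PySem.Dict Int String),
    L.Pairwise (· < ·) →
    (∀ x : Int, nb.contains x = true → ∀ i ∈ L, x < i + 1) →
    (L.foldl (pvShiftStep d) nb).items
      = nb.items ++ L.filterMap (fun i => if d.contains i then some (i + 1, d.getD i "") else none) := by
  intro L
  induction L with
  | nil => intro nb _ _; simp
  | cons i t ih =>
    intro nb hp hf
    have hit : ∀ j ∈ t, i < j := (List.pairwise_cons.mp hp).1
    have hpt := (List.pairwise_cons.mp hp).2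
    rw [List.foldl_cons, List.filterMap_cons]
    cases hc : d.contains i with
    | false =>
      have hstep : pvShiftStep d nb i = nb := by simp [pvShiftStep, hc]
      rw [hstep, ih nb hpt (fun x hx j hj => hf x hx j (List.mem_cons_of_mem _ hj))]
      simp [hc]
    | true =>
      have hfresh : nb.contains (i + 1) = false := by
        cases h1 : nb.contains (i + 1) with
        | false => rfl
        | true => exact absurd (hf (i + 1) h1 i (by simp)) (by omega)
      have hstep : pvShiftStep d nb i = nb.insert (i + 1) (d.getD i "") := by
        simp [pvShiftStep, hc]
      rw [hstep, ih (nb.insert (i + 1) (d.getD i "")) hpt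
        (fun x hx j hj => by
          rw [PySem.Dict.contains_insert] at hx
          rcases Bool.or_eq_true_iff.mp hx with h1 | h1
          · have : x = i + 1 := by simpa using h1
            have := hit j hj; omega
          · have := hf x h1 j (List.mem_cons_of_mem _ hj)
            exact this),
        PySem.Dict.items_insert_of_not_contains _ _ hfresh]
      simp [hc]

theorem pvFA_items (d : PySem.Dict Int String) (s : Int) :
    (force_advance d s).items
      = (PySem.List.pyRange s 5).filterMap
          (fun i => if d.contains i then some (i + 1, d.getD i "") else none) := by
  unfold force_advance
  rw [pvFA_fold_items d _ _ (PySem.List.pairwise_lt_pyRange_one s 5)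
    (fun x hx => by rw [show (PySem.Dict.empty : PySem.Dict Int String).contains x = false from rfl] at hx; cases hx)]
  rfl

-- keys of a force_advance result are strictly increasing
theorem pv_pairwise_filterMap_succ (c : Int → Option (Int × String)) 
    (hm : ∀ i p, c i = some p → p.1 = i + 1) :
    ∀ L : List Int, L.Pairwise (· < ·) → ((L.filterMap c).map Prod.fst).Pairwise (· < ·) := by
  intro L
  induction L with
  | nil => intro _; simp
  | cons i t ih =>
    intro hp
    have hit : ∀ j ∈ t, i < j := (List.pairwise_cons.mp hp).1
    have hpt := (List.pairwise_cons.mp hp).2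
    rw [List.filterMap_cons]
    cases hc : c i with
    | none => exact ih hpt
    | some p =>
      rw [List.map_cons]
      apply List.pairwise_cons.mpr
      refine ⟨?_, ih hpt⟩
      intro y hy
      rcases List.mem_map.mp hy with ⟨q, hq, hqy⟩
      rcases List.mem_filterMap.mp hq with ⟨j, hj, hcj⟩
      have h1 := hm i p hc
      have h2 := hm j q hcj
      have := hit j hj
      omega

theorem pvFA_keys_pairwise (d : PySem.Dict Int String) (s : Int) :
    ((force_advance d s).items.map Prod.fst).Pairwise (· < ·) := by
  rw [pvFA_items]
  exact pv_pairwise_filterMap_succ _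
    (fun i p hp => by
      by_cases hc : d.contains i = true
      · rw [if_pos hc] at hp; injection hp with h; rw [← h]
      · rw [if_neg hc] at hp; cases hp)
    _ (PySem.List.pairwise_lt_pyRange_one s 5)

-- deletion loop: items filter characterisation
theorem pvDel_fold_items :
    ∀ (L : List Int) (d : PySem.Dict Int String),
    (L.foldl pvDelStep d).items = d.items.filter (fun p => decide (p.1 ∉ L)) := by
  intro L
  induction L with
  | nil => intro d; simp
  | cons i t ih =>
    intro d
    have hstep : (pvDelStep d i).items = d.items.filter (fun p => !(p.1 == i)) := by
      cases hc : d.contains i with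
      | true => simp [pvDelStep, hc]; rfl
      | false =>
        simp only [pvDelStep, hc, Bool.false_eq_true, if_false]
        have : ∀ p ∈ d.items, ¬ (p.1 == i) = true := by
          intro p hp hpi
          have h1 : p.1 = i := by simpa using hpi
          have h2 : i ∈ d.keys := by
            rw [← h1]; exact PySem.Dict.mem_keys_of_mem_items d hp
          rw [← PySem.Dict.contains_iff_mem_keys] at h2
          rw [hc] at h2; cases h2
        exact (List.filter_eq_self.mpr (fun p hp => by
          cases h : (p.1 == i) with
          | false => simp
          | true => exact absurd h (this p hp))).symm
    rw [List.foldl_cons, ih, hstep, List.filter_filter]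
    apply List.filter_congr
    intro p _
    by_cases h1 : p.1 = i <;> by_cases h2 : p.1 ∈ t <;> simp [h1, h2]

-- comprehension loop: items are exactly the comprehension's list
theorem pvIns_fold_items (M : List (Int × String)) (h : (M.map Prod.fst).Nodup) :
    (M.foldl pvInsStep PySem.Dict.empty).items = M := by
  have he : List.foldl pvInsStep PySem.Dict.empty M
      = List.foldl (fun d (a : Int × String) => d.insert a.1 a.2) PySem.Dict.empty M := rfl
  rw [he, PySem.Dict.items_foldl_insert_fresh M Prod.fst Prod.snd PySem.Dict.empty
    (fun a _ => rfl) h]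
  rw [show (PySem.Dict.empty : PySem.Dict Int String).items = [] from rfl]
  simp

-- after dicts coincide for bases_hit > 0
theorem pv_after_eq (da : PySem.Dict Int String) (h : Int) (hnd : da.keys.Nodup) :
    (PySem.List.pyRange 0 h).foldl pvDelStep da
      = (da.items.filter (fun p => !(decide (0 ≤ p.1) && decide (p.1 < h)))).foldl
          pvInsStep PySem.Dict.empty := by
  apply PySem.Dict.ext
  rw [pvDel_fold_items, pvIns_fold_items]
  · apply List.filter_congr
    intro p _
    by_cases h1 : 0 ≤ p.1 ∧ p.1 < h
    · simp [PySem.List.mem_pyRange_one, h1.1, h1.2]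
    · have : p.1 ∉ PySem.List.pyRange 0 h := by
        rw [PySem.List.mem_pyRange_one]; omega
      simp [this]
      omega
  · have hsub : ((da.items.filter (fun p => !(decide (0 ≤ p.1) && decide (p.1 < h)))).map Prod.fst).Sublist
        (da.items.map Prod.fst) := List.Sublist.map _ List.filter_sublist
    exact List.Nodup.sublist hsub hnd

def pvFoldIter (d0 : PySem.Dict Int String) (h : Int) : PySem.Dict Int String :=
  (PySem.List.pyRange 0 h).foldl (fun b i => force_advance b i) d0

theorem pv_foldIter_succ (d0 : PySem.Dict Int String) (h : Int) (hh : 0 ≤ h) :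
    pvFoldIter d0 (h + 1) = force_advance (pvFoldIter d0 h) h := by
  unfold pvFoldIter
  rw [PySem.List.pyRange_one_succ_right hh, List.foldl_append]
  rfl

theorem pv_foldIter_keys_pairwise (d0 : PySem.Dict Int String) (h : Int) (hh : 1 ≤ h) :
    ((pvFoldIter d0 h).items.map Prod.fst).Pairwise (· < ·) := by
  have h1 : h - 1 + 1 = h := by omega
  have h2 := pv_foldIter_succ d0 (h - 1) (by omega)
  rw [h1] at h2
  rw [h2]
  exact pvFA_keys_pairwise _ _

theorem pv_foldIter_nodup (d0 : PySem.Dict Int String) (h : Int) (hh : 1 ≤ h) :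
    (pvFoldIter d0 h).keys.Nodup := by
  have := pv_foldIter_keys_pairwise d0 h hh
  exact (this.imp (fun {a b} hlt => by omega))

-- full membership characterisation of the iterated force_advance
theorem pv_foldIter_mem (d0 : PySem.Dict Int String) (hnd : d0.keys.Nodup) :
    ∀ (h : Int), 1 ≤ h → ∀ (k : Int) (v : String),
    ((k, v) ∈ (pvFoldIter d0 h).items ↔ 0 ≤ k - h ∧ k - h ≤ 5 - h ∧ (k - h, v) ∈ d0.items) := by
  intro h hh
  induction h, hh using Int.le_induction with
  | base =>
    intro k v
    have h1 : pvFoldIter d0 1 = force_advance d0 0 := by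
      have := pv_foldIter_succ d0 0 (by omega)
      rw [show (0:Int) + 1 = 1 from rfl] at this
      rw [this]
      unfold pvFoldIter
      rw [PySem.List.pyRange_one_eq_nil (by omega)]
      rfl
    rw [h1, pvFA_items]
    constructor
    · intro hm
      rcases List.mem_filterMap.mp hm with ⟨i, hi, hci⟩
      rw [PySem.List.mem_pyRange_one] at hi
      by_cases hc : d0.contains i = true
      · rw [if_pos hc] at hci
        injection hci with hci'
        have hk : i + 1 = k := congrArg Prod.fst hci'
        have hv : d0.getD i "" = v := congrArg Prod.snd hci'
        have := (pv_c_getD_iff d0 i v).mp ⟨hc, hv⟩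
        have hmem := (PySem.Dict.get?_eq_some_iff_mem_items d0 i v hnd).mp this
        refine ⟨by omega, by omega, ?_⟩
        rw [show k - 1 = i by omega]
        exact hmem
      · rw [if_neg hc] at hci; cases hci
    · rintro ⟨hk0, hk5, hmem⟩
      apply List.mem_filterMap.mpr
      refine ⟨k - 1, ?_, ?_⟩
      · rw [PySem.List.mem_pyRange_one]; omega
      · have := (PySem.Dict.get?_eq_some_iff_mem_items d0 (k - 1) v hnd).mpr hmem
        have h2 := (pv_c_getD_iff d0 (k - 1) v).mpr this
        rw [if_pos h2.1, h2.2, show k - 1 + 1 = k by omega]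
  | succ h hh ih =>
    intro k v
    have hndh : (pvFoldIter d0 h).keys.Nodup := pv_foldIter_nodup d0 h hh
    rw [pv_foldIter_succ d0 h (by omega), pvFA_items]
    constructor
    · intro hm
      rcases List.mem_filterMap.mp hm with ⟨i, hi, hci⟩
      rw [PySem.List.mem_pyRange_one] at hi
      by_cases hc : (pvFoldIter d0 h).contains i = true
      · rw [if_pos hc] at hci
        injection hci with hci'
        have hk : i + 1 = k := congrArg Prod.fst hci'
        have hv : (pvFoldIter d0 h).getD i "" = v := congrArg Prod.snd hci'
        have := (pv_c_getD_iff _ i v).mp ⟨hc, hv⟩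
        have hmem := (PySem.Dict.get?_eq_some_iff_mem_items _ i v hndh).mp this
        rcases (ih i v).mp hmem with ⟨h1, h2, h3⟩
        refine ⟨by omega, by omega, ?_⟩
        rw [show k - (h + 1) = i - h by omega]
        exact h3
      · rw [if_neg hc] at hci; cases hci
    · rintro ⟨hk0, hk5, hmem⟩
      apply List.mem_filterMap.mpr
      refine ⟨k - 1, ?_, ?_⟩
      · rw [PySem.List.mem_pyRange_one]; omega
      · have hmem' : (k - 1, v) ∈ (pvFoldIter d0 h).items := by
          apply (ih (k - 1) v).mpr
          refine ⟨by omega, by omega, ?_⟩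
          rw [show k - 1 - h = k - (h + 1) by omega]
          exact hmem
        have := (PySem.Dict.get?_eq_some_iff_mem_items _ (k - 1) v hndh).mpr hmem'
        have h2 := (pv_c_getD_iff _ (k - 1) v).mpr this
        rw [if_pos h2.1, h2.2, show k - 1 + 1 = k by omega]

-- bases dicts: same items as sets, for bases_hit >= 1
theorem pv_bases_mem_eq (d0 : PySem.Dict Int String) (hnd : d0.keys.Nodup)
    (h : Int) (hh : 1 ≤ h) : ∀ (k : Int) (v : String),
    ((k, v) ∈ ((PySem.List.pyRange 3 6).foldl pvDelStep (pvFoldIter d0 h)).items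
      ↔ (k, v) ∈ ((d0.items.filter (fun p => decide (0 ≤ p.1) && decide (p.1 ≤ 2 - h))).map
          (fun p => (p.1 + h, p.2)))) := by
  intro k v
  rw [pvDel_fold_items]
  constructor
  · intro hm
    rcases List.mem_filter.mp hm with ⟨hm1, hm2⟩
    rcases (pv_foldIter_mem d0 hnd h hh k v).mp hm1 with ⟨h1, h2, h3⟩
    have hnot : ¬ (3 ≤ k ∧ k < 6) := by
      have := hm2
      simp only [decide_eq_true_eq, PySem.List.mem_pyRange_one] at this
      omega
    apply List.mem_map.mpr
    refine ⟨(k - h, v), ?_, ?_⟩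
    · apply List.mem_filter.mpr
      refine ⟨h3, ?_⟩
      simp only [Bool.and_eq_true, decide_eq_true_eq]
      omega
    · have he : k - h + h = k := by omega
      rw [he]
  · intro hm
    rcases List.mem_map.mp hm with ⟨p, hp, hpk⟩
    rcases List.mem_filter.mp hp with ⟨hp1, hp2⟩
    simp only [Bool.and_eq_true, decide_eq_true_eq] at hp2
    have hk : p.1 + h = k := congrArg Prod.fst hpk
    have hv : p.2 = v := congrArg Prod.snd hpk
    apply List.mem_filter.mpr
    constructor
    · apply (pv_foldIter_mem d0 hnd h hh k v).mpr
      refine ⟨by omega, by omega, ?_⟩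
      rw [show k - h = p.1 by omega, ← hv]
      simpa using hp1
    · simp only [decide_eq_true_eq]
      rw [PySem.List.mem_pyRange_one]
      omega

-- nodup keys on both sides (bases_hit >= 1)
theorem pv_basesA_nodup (d0 : PySem.Dict Int String) (h : Int) (hh : 1 ≤ h) :
    ((PySem.List.pyRange 3 6).foldl pvDelStep (pvFoldIter d0 h)).keys.Nodup := by
  show ((((PySem.List.pyRange 3 6).foldl pvDelStep (pvFoldIter d0 h)).items).map Prod.fst).Nodup
  rw [pvDel_fold_items]
  have hsub : (((pvFoldIter d0 h).items.filter
        (fun p => decide (p.1 ∉ PySem.List.pyRange 3 6))).map Prod.fst).Sublist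
      ((pvFoldIter d0 h).items.map Prod.fst) := List.Sublist.map _ List.filter_sublist
  exact List.Nodup.sublist hsub
    ((pv_foldIter_keys_pairwise d0 h hh).imp (fun {a b} hlt => by omega))

theorem pv_M_fst_nodup (d0 : PySem.Dict Int String) (hnd : d0.keys.Nodup) (h : Int) :
    (((d0.items.filter (fun p => decide (0 ≤ p.1) && decide (p.1 ≤ 2 - h))).map
        (fun p => (p.1 + h, p.2))).map Prod.fst).Nodup := by
  rw [List.map_map]
  have he : (Prod.fst ∘ fun p : Int × String => (p.1 + h, p.2)) = (fun x => x + h) ∘ Prod.fst := rfl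
  rw [he, ← List.map_map]
  apply List.Nodup.map (fun a b hab => by omega)
  have hsub : ((d0.items.filter (fun p => decide (0 ≤ p.1) && decide (p.1 ≤ 2 - h))).map Prod.fst).Sublist
      (d0.items.map Prod.fst) := List.Sublist.map _ List.filter_sublist
  exact List.Nodup.sublist hsub hnd

-- ===== VERDICT (by name: the statement is the Claim_ definition above) =====
theorem calculate_advances_spec : Claim_equal_calculate_advances := by
  intro bases_before bases_after bases_hit _
  unfold Spec_calculate_advances calculate_advances calculate_advances_alt
  by_cases hpos : bases_hit > 0
  · simp only [if_pos hpos]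
    rw [pv_after_eq (PySem.Dict.ofList bases_after) bases_hit
      (PySem.Dict.nodup_keys_ofList bases_after)]
    have hfi : (PySem.List.pyRange 0 bases_hit).foldl (fun b i => force_advance b i)
        (PySem.Dict.ofList bases_before) = pvFoldIter (PySem.Dict.ofList bases_before) bases_hit := rfl
    rw [hfi]
    set M := ((PySem.Dict.ofList bases_before).items.filter
        (fun p => decide (0 ≤ p.1) && decide (p.1 ≤ 2 - bases_hit))).map
        (fun p => (p.1 + bases_hit, p.2)) with hM
    have hndB : ((M.foldl pvInsStep PySem.Dict.empty).keys).Nodup := by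
      show (((M.foldl pvInsStep PySem.Dict.empty).items).map Prod.fst).Nodup
      rw [pvIns_fold_items M (by rw [hM]; exact pv_M_fst_nodup _ (PySem.Dict.nodup_keys_ofList bases_before) bases_hit)]
      rw [hM]; exact pv_M_fst_nodup _ (PySem.Dict.nodup_keys_ofList bases_before) bases_hit
    apply pvFinal_eq
    · apply pv_get?_ext
      · exact pv_basesA_nodup _ bases_hit (by omega)
      · exact hndB
      · intro k v
        rw [pvIns_fold_items M (by rw [hM]; exact pv_M_fst_nodup _ (PySem.Dict.nodup_keys_ofList bases_before) bases_hit), hM]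
        exact pv_bases_mem_eq _ (PySem.Dict.nodup_keys_ofList bases_before) bases_hit (by omega) k v
    · exact pv_basesA_nodup _ bases_hit (by omega)
    · exact hndB
  · simp only [if_neg hpos]
    rw [PySem.List.pyRange_one_eq_nil (by omega : bases_hit ≤ 0), List.foldl_nil]
    exact pvFinal_eq _ _ _ (fun _ => rfl)
      (PySem.Dict.nodup_keys_ofList bases_before) (PySem.Dict.nodup_keys_ofList bases_before)
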